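-- pv_equiv track=rewrite | github.com/AndreBardi/Esercizi | esercizi/lezione_5/lezione5.py | count_isolated
-- ===== SOURCE A (Python) =====
-- def count_isolated(num:int) -> int:
--     count = 0
--     for i in range(len(num)):
--         if i == 0 and num[i] != num[i+1]:
--             count+=1
--         elif i == len(num)-1 and num[i] != num[i-1]:
--             count+=1
--         elif num[i] != num[i-1] and num[i] != num[i+1]:
--             count+=1
--     return count
-- ===== SOURCE B (Python) =====
-- def count_isolated(num):
--     # Run-length encode the sequence into maximal runs, then count the runs of length 1.
--     runs = []
--     for x in num:
--         if runs and runs[-1][0] == x: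
--             runs[-1][1] += 1
--         else:
--             runs.append([x, 1])
--     return sum(1 for _, c in runs if c == 1)
-- ===== Notes on version B (the rewrite author's own statement) =====
-- stated objective: alternative
-- what changed: Replaces A's single indexed pass with three positional branches and neighbour comparisons by a two-stage run-length-encoding algorithm: build the list of maximal equal-character runs, then count the runs of length 1 (an element differs from both neighbours iff it forms a run of its own).
import Mathlib
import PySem

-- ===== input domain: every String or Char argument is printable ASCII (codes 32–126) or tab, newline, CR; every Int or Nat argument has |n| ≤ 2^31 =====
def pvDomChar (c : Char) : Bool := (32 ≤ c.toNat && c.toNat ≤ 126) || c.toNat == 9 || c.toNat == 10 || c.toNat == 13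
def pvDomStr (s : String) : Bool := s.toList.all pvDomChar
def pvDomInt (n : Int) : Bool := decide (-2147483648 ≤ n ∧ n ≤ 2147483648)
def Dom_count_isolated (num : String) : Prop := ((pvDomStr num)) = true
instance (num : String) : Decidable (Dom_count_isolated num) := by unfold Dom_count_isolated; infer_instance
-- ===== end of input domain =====

-- B replaces A's indexed neighbour-comparison loop by a two-stage run-length encoding:
-- build the maximal equal-character runs, then count the runs of length 1 (objective: alternative; not faster).

-- ===== PORT A =====
def count_isolated (num : String) : Int :=
  let l := num.toList
  let n : Int := PySem.Str.len num
  (PySem.List.pyRange 0 n 1).foldl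
    (fun count i =>
      if i == 0 && (PySem.List.pyGet? l i != PySem.List.pyGet? l (i + 1)) then count + 1
      else if i == n - 1 && (PySem.List.pyGet? l i != PySem.List.pyGet? l (i - 1)) then count + 1
      else if (PySem.List.pyGet? l i != PySem.List.pyGet? l (i - 1)) && (PySem.List.pyGet? l i != PySem.List.pyGet? l (i + 1)) then count + 1
      else count) 0

-- ===== PORT B =====
-- the loop body of Source B: extend the last run if it carries the same char, else open a new run
def runStep (runs : List (Char × Int)) (x : Char) : List (Char × Int) :=
  match runs.getLast? with
  | some (c, n) => if c == x then runs.dropLast ++ [(c, n + 1)] else runs ++ [(x, (1 : Int))]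
  | none => runs ++ [(x, (1 : Int))]

def count_isolated_alt (num : String) : Int :=
  let runs := num.toList.foldl runStep []
  ((runs.filter (fun r => r.2 == 1)).map (fun _ => (1 : Int))).sum

-- ===== PRECONDITION & SPEC =====
-- Pre_ excludes exactly single-character strings, on which A raises IndexError (num[i+1] at i = 0).
def Pre_count_isolated (num : String) : Prop := num.toList.length ≠ 1
instance (num : String) : Decidable (Pre_count_isolated num) := by unfold Pre_count_isolated; infer_instance
def pvWitness_count_isolated : String := "aab"

def Spec_count_isolated (num : String) (out : Int) : Prop := out = count_isolated_alt num
instance (num : String) (out : Int) : Decidable (Spec_count_isolated num out) := by unfold Spec_count_isolated; infer_instance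

-- ===== CLAIM (what is proved, stated in full; the proofs are below) =====
def Claim_equal_count_isolated : Prop := ∀ (num : String), Dom_count_isolated num → Pre_count_isolated num → Spec_count_isolated num (count_isolated num)

-- ===== LEMMAS AND PROOFS =====

-- run-style recursion both ports are reduced to: count of elements differing from the
-- previous element (tracked as `prev`, sentinel `none` at the start) and the next one
def countR : Option Char → List Char → Int
  | _, [] => 0
  | p, [b] => if some b != p then 1 else 0
  | p, b :: c :: rest => (if (some b != p) && (b != c) then 1 else 0) + countR (some b) (c :: rest)

-- B-side recursion: the complete run list produced from a current run (c, n) and the rest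
def runF (c : Char) (n : Int) : List Char → List (Char × Int)
  | [] => [(c, n)]
  | x :: xs => if c == x then runF c (n + 1) xs else (c, n) :: runF x 1 xs

def singles (runs : List (Char × Int)) : Int :=
  ((runs.filter (fun r => r.2 == 1)).map (fun _ => (1 : Int))).sum

lemma singles_cons (c : Char) (n : Int) (t : List (Char × Int)) :
    singles ((c, n) :: t) = (if n = 1 then 1 else 0) + singles t := by
  simp only [singles, List.filter_cons]
  split <;> rename_i h <;> simp_all <;> omega

lemma foldl_runStep : ∀ (xs : List Char) (rs : List (Char × Int)) (c : Char) (n : Int),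
    xs.foldl runStep (rs ++ [(c, n)]) = rs ++ runF c n xs := by
  intro xs
  induction xs with
  | nil => intro rs c n; simp [runF]
  | cons x xs IH =>
    intro rs c n
    rw [List.foldl_cons]
    have hs : runStep (rs ++ [(c, n)]) x =
        if c == x then rs ++ [(c, n + 1)] else (rs ++ [(c, n)]) ++ [(x, (1 : Int))] := by
      simp only [runStep, List.getLast?_concat, List.dropLast_concat]
    rw [hs]
    by_cases h : c == x
    · rw [if_pos h, IH]
      simp [runF, h]
    · rw [if_neg h, IH (rs ++ [(c, n)]) x 1]
      simp [runF, h]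

lemma singles_runF : ∀ (xs : List Char) (c : Char) (n : Int), 1 ≤ n →
    singles (runF c n xs) =
      (if n = 1 ∧ xs.head? ≠ some c then 1 else 0) + countR (some c) xs := by
  intro xs
  induction xs with
  | nil =>
    intro c n _
    show singles [(c, n)] = _
    rw [singles_cons]
    simp [singles, countR]
  | cons x xs IH =>
    intro c n hn
    by_cases h : c = x
    · subst h
      rw [runF, if_pos (by simp), IH c (n + 1) (by omega)]
      have hfalse : ¬(n + 1 = 1) := by omega
      simp only [hfalse, false_and, if_false, List.head?_cons, ne_eq, not_true_eq_false, and_false]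
      cases xs with
      | nil => simp [countR]
      | cons y r => simp [countR]
    · have h' : ¬x = c := fun e => h e.symm
      rw [runF, if_neg (by simpa using h), singles_cons, IH x 1 (by norm_num)]
      cases xs with
      | nil =>
        simp only [countR, List.head?_nil, List.head?_cons]
        by_cases n1 : n = 1 <;> simp [n1, h', bne] <;> try ring
      | cons y r =>
        simp only [countR, List.head?_cons]
        by_cases n1 : n = 1 <;> by_cases hxy : x = y
        · subst hxy; simp [n1, h', bne]; try ring
        · have h2 : ¬y = x := fun e => hxy e.symm
          simp [n1, hxy, h2, h', bne]; try ring
        · subst hxy; simp [n1, h', bne]; try ring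
        · have h2 : ¬y = x := fun e => hxy e.symm
          simp [n1, hxy, h2, h', bne]; try ring

lemma B_eq_countR (num : String) : count_isolated_alt num = countR none num.toList := by
  unfold count_isolated_alt
  cases hl : num.toList with
  | nil => simp [countR, singles]
  | cons x xs =>
    show singles (List.foldl runStep [] (x :: xs)) = _
    rw [List.foldl_cons]
    have h0 : runStep [] x = [] ++ [(x, (1 : Int))] := by simp [runStep]
    rw [h0, foldl_runStep xs [] x 1, List.nil_append,
      singles_runF xs x 1 (by norm_num)]
    cases xs with
    | nil => simp [countR]
    | cons y r =>
      simp only [countR, List.head?_cons, true_and]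
      have : (some x != none) = true := rfl
      simp only [this, Bool.true_and]
      by_cases hxy : x = y
      · simp [hxy, bne]
      · have h' : ¬y = x := fun e => hxy e.symm
        simp [hxy, h', bne]

lemma A_loop (l : List Char) : ∀ (m k : Nat) (acc : Int), l.length = k + m → 1 ≤ k →
    (PySem.List.pyRange (k : Int) (l.length : Int) 1).foldl
      (fun count i =>
        if i == 0 && (PySem.List.pyGet? l i != PySem.List.pyGet? l (i + 1)) then count + 1
        else if i == (l.length : Int) - 1 && (PySem.List.pyGet? l i != PySem.List.pyGet? l (i - 1)) then count + 1
        else if (PySem.List.pyGet? l i != PySem.List.pyGet? l (i - 1)) && (PySem.List.pyGet? l i != PySem.List.pyGet? l (i + 1)) then count + 1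
        else count) acc
    = acc + countR (some (l.getD (k - 1) default)) (l.drop k) := by
  intro m
  induction m with
  | zero =>
    intro k acc hlen hk
    rw [PySem.List.pyRange_one_eq_nil (by omega)]
    rw [List.drop_of_length_le (by omega)]
    simp [countR]
  | succ m' IH =>
    intro k acc hlen hk
    have hkl : k < l.length := by omega
    have hkm : k - 1 < l.length := by omega
    have e1 : ((k : Int) + 1) = ((k + 1 : Nat) : Int) := by omega
    have e2 : ((k : Int) - 1) = ((k - 1 : Nat) : Int) := by omega
    have hk0 : ¬((k : Int) = 0) := by omega
    have g0 : l[k]? = some (l[k]'hkl) := List.getElem?_eq_getElem hkl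
    have g1 : l[k - 1]? = some (l[k - 1]'hkm) := List.getElem?_eq_getElem hkm
    have hgd : l.getD (k - 1) default = l[k - 1]'hkm := List.getD_eq_getElem l default hkm
    rw [PySem.List.pyRange_one_cons (by exact_mod_cast hkl), List.foldl_cons]
    by_cases hlast : l.length = k + 1
    · have heq : (k : Int) = (l.length : Int) - 1 := by omega
      have g2 : l[k + 1]? = none := by rw [List.getElem?_eq_none_iff]; omega
      have hdrop : l.drop k = [l[k]'hkl] := by
        rw [List.drop_eq_getElem_cons hkl, List.drop_of_length_le (by omega)]
      rw [PySem.List.pyRange_one_eq_nil (by omega), List.foldl_nil]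
      simp only [e1, e2, PySem.List.pyGet?_natCast, g0, g1, g2, hdrop, hgd]
      by_cases hbc : l[k]'hkl = l[k - 1]'hkm <;>
        simp [countR, heq, hbc] <;> omega
    · have hlt : k + 1 < l.length := by omega
      have g2 : l[k + 1]? = some (l[k + 1]'hlt) := List.getElem?_eq_getElem hlt
      have hne : ¬((k : Int) = (l.length : Int) - 1) := by omega
      have hgd2 : l.getD (k + 1 - 1) default = l[k]'hkl := by
        simpa using List.getD_eq_getElem l default hkl
      rw [e1, IH (k + 1) _ (by omega) (by omega)]
      have hd1 : l.drop k = l[k]'hkl :: l.drop (k + 1) := List.drop_eq_getElem_cons hkl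
      have hd2 : l.drop (k + 1) = l[k + 1]'hlt :: l.drop (k + 2) := List.drop_eq_getElem_cons hlt
      rw [hgd2, hd1, hd2]
      simp only [countR, e2, PySem.List.pyGet?_natCast, g0, g1, g2, hgd]
      by_cases h1 : l[k]'hkl = l[k - 1]'hkm <;>
        by_cases h2 : l[k]'hkl = l[k + 1]'hlt <;>
          simp [hne, h1, h2] <;> omega

lemma A_eq_countR (l : List Char) (hpre : l.length ≠ 1) :
    (PySem.List.pyRange 0 (l.length : Int) 1).foldl
      (fun count i =>
        if i == 0 && (PySem.List.pyGet? l i != PySem.List.pyGet? l (i + 1)) then count + 1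
        else if i == (l.length : Int) - 1 && (PySem.List.pyGet? l i != PySem.List.pyGet? l (i - 1)) then count + 1
        else if (PySem.List.pyGet? l i != PySem.List.pyGet? l (i - 1)) && (PySem.List.pyGet? l i != PySem.List.pyGet? l (i + 1)) then count + 1
        else count) 0
    = countR none l := by
  match l, hpre with
  | [], _ => simp [countR, PySem.List.pyRange_one_eq_nil]
  | b :: c :: rest', _ =>
    rw [PySem.List.pyRange_one_cons (by simp; omega), List.foldl_cons]
    have hA := fun acc : Int => A_loop (b :: c :: rest') (rest'.length + 1) 1 acc (by simp; omega) (by omega)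
    simp only [show (1 : Nat) - 1 = 0 from rfl, List.getD_cons_zero, List.drop_succ_cons,
      List.drop_zero] at hA
    rw [show ((0 : Int) + 1) = ((1 : Nat) : Int) from by norm_num]
    rw [hA]
    have g0 : PySem.List.pyGet? (b :: c :: rest') 0 = some b := by simp [PySem.List.pyGet?_zero]
    have g1 : PySem.List.pyGet? (b :: c :: rest') (0 + 1) = some c := by
      rw [show ((0 : Int) + 1) = ((1 : Nat) : Int) from by norm_num, PySem.List.pyGet?_natCast]; rfl
    have hne2 : ((0 : Int) == (((b :: c :: rest').length : Int)) - 1) = false := by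
      simp only [beq_eq_false_iff_ne]; intro h; simp at h; omega
    by_cases hbc : b = c
    · simp [countR, hbc]
      intro h
      exact absurd h (by omega)
    · simp [countR, g0, hbc]

-- ===== VERDICT (by name: the statement is the Claim_ definition above) =====
theorem count_isolated_spec : Claim_equal_count_isolated := by
  intro num _ hpre
  unfold Spec_count_isolated
  rw [B_eq_countR]
  unfold count_isolated
  simp only [PySem.Str.len_eq]
  exact A_eq_countR num.toList hpre
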